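-- pv_equiv track=rewrite | github.com/Zaphoood/truthtables | tt.py | _unwrap_parentheses
-- ===== SOURCE A (Python) =====
-- def _unwrap_parentheses(literal: list[str]) -> list[str]:
--     stack = []
--     level = 0
--     for c in literal:
--         match c:
--             case "(":
--                 stack.append(level)
--                 level += 1
--             case ")":
--                 level -= 1
--                 stack.append(level)
--     while literal[0] == "(":
--         if literal[-1] != ")":
--             break
--         if stack[0] in stack[1:-1]:
--             break
--         stack = stack[1:-1]
--         literal = literal[1:-1]
--
--     return literal
-- ===== SOURCE B (Python) =====
-- def _wraps(literal):
--     depth = 1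
--     for c in literal[1:-1]:
--         if c == "(":
--             depth += 1
--         elif c == ")":
--             depth -= 1
--             if depth == 0:
--                 return False
--     return True
--
--
-- def _unwrap_parentheses(literal):
--     while len(literal) >= 2 and literal[0] == "(" and literal[-1] == ")" and _wraps(literal):
--         literal = literal[1:-1]
--     return literal
-- ===== Notes on version B (the rewrite author's own statement) =====
-- stated objective: simpler
-- what changed: A precomputes a list of the nesting level of every parenthesis and slices it in step with the literal, testing redundancy of an outer pair by a linear membership scan over that sliced level list; B never builds any level list: it strips layers with a plain loop whose wrapping test is a single depth-counter scan over the interior with early exit.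
import Mathlib
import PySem

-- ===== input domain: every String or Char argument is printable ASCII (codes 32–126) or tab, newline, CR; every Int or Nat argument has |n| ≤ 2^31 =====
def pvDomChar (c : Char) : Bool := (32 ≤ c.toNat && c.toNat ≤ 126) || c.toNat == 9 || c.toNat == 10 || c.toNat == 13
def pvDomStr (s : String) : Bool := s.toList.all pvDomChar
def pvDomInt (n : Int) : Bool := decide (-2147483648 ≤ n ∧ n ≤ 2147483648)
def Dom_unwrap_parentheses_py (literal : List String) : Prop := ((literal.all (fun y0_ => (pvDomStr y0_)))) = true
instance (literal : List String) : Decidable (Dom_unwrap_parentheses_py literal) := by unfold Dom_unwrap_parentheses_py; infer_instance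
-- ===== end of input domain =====

-- B replaces A's precomputed-and-sliced list of parenthesis levels (with a linear membership
-- test per stripped layer) by a plain stripping loop whose wrapping test is a single depth
-- counter scan with early exit — no level list is ever built or sliced.  Objective: simpler.
-- Where Python A raises IndexError (the empty list, or a literal that is nothing but one
-- balanced nest '('^m ')'^m, which A strips down to the empty list before indexing it),
-- B returns the fully stripped (empty) list; those inputs are outside Pre_.

-- ===== PORT A =====
-- state (stack, level); A's 'for c in literal: match …'
def pvStackStep (st : List Int × Int) (c : String) : List Int × Int :=
  if c = "(" then (st.1 ++ [st.2], st.2 + 1)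
  else if c = ")" then (st.1 ++ [st.2 - 1], st.2 - 1)
  else st

-- A's 'while literal[0] == "(": …' loop.  'literal[0]' on an empty list is Python's
-- IndexError: the port returns [] there and Pre_ excludes exactly those inputs.
-- 'stack[0]' is ported as pyGetD …ack 0 0: whenever that line is reached, literal[0] == "(",
-- so the current literal contains a parenthesis and stack is nonempty (Python never raises there).
def pvALoop (lit : List String) (stack : List Int) : List String :=
  match lit with
  | [] => []  -- 'literal[0]' IndexError in Python; outside Pre_
  | c :: rest =>  -- 'literal[0] == "("' read off the head
    if c = "(" then
      if PySem.List.pyGet? (c :: rest) (-1) ≠ some ")" then c :: rest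
      else if PySem.List.pyGetD stack 0 0 ∈ PySem.List.slice stack (some 1) (some (-1)) then c :: rest
      else pvALoop (PySem.List.slice (c :: rest) (some 1) (some (-1)))
                   (PySem.List.slice stack (some 1) (some (-1)))
    else c :: rest
termination_by lit.length
decreasing_by
  simp [PySem.List.length_slice, PySem.List.clampIdx]
  split <;> omega

def unwrap_parentheses_py (literal : List String) : List String :=
  pvALoop literal (literal.foldl pvStackStep ([], 0)).1

-- ===== PORT B =====
-- 'for c in literal[1:-1]: …' of _wraps, with the early 'return False'
def pvWrapsAux (depth : Int) : List String → Bool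
  | [] => true
  | c :: cs =>
    if c = "(" then pvWrapsAux (depth + 1) cs
    else if c = ")" then
      if depth - 1 = 0 then false else pvWrapsAux (depth - 1) cs
    else pvWrapsAux depth cs

def pvWraps (literal : List String) : Bool :=
  pvWrapsAux 1 (PySem.List.slice literal (some 1) (some (-1)))

def unwrap_parentheses_py_alt (literal : List String) : List String :=
  if h : 2 ≤ literal.length ∧ PySem.List.pyGet? literal 0 = some "(" ∧
      PySem.List.pyGet? literal (-1) = some ")" ∧ pvWraps literal = true then
    unwrap_parentheses_py_alt (PySem.List.slice literal (some 1) (some (-1)))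
  else literal
termination_by literal.length
decreasing_by
  have hne : literal ≠ [] := by
    intro hh
    rw [hh] at h
    simp at h
  simp [PySem.List.length_slice, PySem.List.clampIdx, hne]
  omega

-- ===== PRECONDITION & SPEC =====
-- Pre_ excludes exactly the inputs on which Python A raises IndexError: the empty list, and a
-- literal that is one balanced nest '('^m ')'^m, which A strips to the empty list and then indexes.
def Pre_unwrap_parentheses_py (literal : List String) : Prop :=
  ¬ (literal = [] ∨
     literal = List.replicate (literal.length / 2) "(" ++ List.replicate (literal.length / 2) ")")
instance (literal : List String) : Decidable (Pre_unwrap_parentheses_py literal) := by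
  unfold Pre_unwrap_parentheses_py; infer_instance

def pvWitness_unwrap_parentheses_py : List String := ["(", "x", ")", "y"]

def Spec_unwrap_parentheses_py (literal : List String) (out : List String) : Prop :=
  out = unwrap_parentheses_py_alt literal
instance (literal : List String) (out : List String) : Decidable (Spec_unwrap_parentheses_py literal out) := by
  unfold Spec_unwrap_parentheses_py; infer_instance

-- ===== CLAIM (what is proved, stated in full; the proofs are below) =====
def Claim_equal_unwrap_parentheses_py : Prop := ∀ (literal : List String),
  Dom_unwrap_parentheses_py literal → Pre_unwrap_parentheses_py literal →
  Spec_unwrap_parentheses_py literal (unwrap_parentheses_py literal)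

-- ===== LEMMAS AND PROOFS =====

-- recursive form of A's stack builder, starting at level lvl
def pvStackRec : Int → List String → List Int
  | _, [] => []
  | lvl, c :: cs =>
    if c = "(" then lvl :: pvStackRec (lvl + 1) cs
    else if c = ")" then (lvl - 1) :: pvStackRec (lvl - 1) cs
    else pvStackRec lvl cs

theorem pvStack_foldl_fst (cs : List String) : ∀ (acc : List Int) (lvl : Int),
    (List.foldl pvStackStep (acc, lvl) cs).1 = acc ++ pvStackRec lvl cs := by
  induction cs with
  | nil => intro acc lvl; simp [pvStackRec]
  | cons c cs ih =>
    intro acc lvl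
    by_cases h1 : c = "("
    · subst h1; simp [pvStackStep, pvStackRec, ih]
    · by_cases h2 : c = ")"
      · subst h2; simp [pvStackStep, pvStackRec, ih]
      · simp [pvStackStep, pvStackRec, h1, h2, ih]

theorem pvStackRec_concat_close (cs : List String) : ∀ (lvl : Int), ∃ e : Int,
    pvStackRec lvl (cs ++ [")"]) = pvStackRec lvl cs ++ [e] := by
  induction cs with
  | nil => intro lvl; exact ⟨lvl - 1, by simp [pvStackRec]⟩
  | cons c cs ih =>
    intro lvl
    by_cases h1 : c = "("
    · obtain ⟨e, he⟩ := ih (lvl + 1)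
      exact ⟨e, by subst h1; simp [pvStackRec, he]⟩
    · by_cases h2 : c = ")"
      · obtain ⟨e, he⟩ := ih (lvl - 1)
        exact ⟨e, by subst h2; simp [pvStackRec, he]⟩
      · obtain ⟨e, he⟩ := ih lvl
        exact ⟨e, by simp [pvStackRec, h1, h2, he]⟩

-- B's early-exit depth scan fails exactly when some parenthesis of cs sits at level lvl - d
theorem pvWrapsAux_iff (cs : List String) : ∀ (d lvl : Int), 1 ≤ d →
    (pvWrapsAux d cs = false ↔ (lvl - d) ∈ pvStackRec lvl cs) := by
  induction cs with
  | nil => intro d lvl _; simp [pvWrapsAux, pvStackRec]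
  | cons c cs ih =>
    intro d lvl hd
    by_cases h1 : c = "("
    · subst h1
      rw [show pvWrapsAux d ("(" :: cs) = pvWrapsAux (d + 1) cs by simp [pvWrapsAux]]
      rw [show pvStackRec lvl ("(" :: cs) = lvl :: pvStackRec (lvl + 1) cs by simp [pvStackRec]]
      rw [List.mem_cons, ih (d + 1) (lvl + 1) (by omega)]
      constructor
      · intro h; right; rw [show lvl + 1 - (d + 1) = lvl - d by ring] at h; exact h
      · rintro (h | h)
        · omega
        · rw [show lvl + 1 - (d + 1) = lvl - d by ring]; exact h
    · by_cases h2 : c = ")"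
      · subst h2
        rw [show pvWrapsAux d (")" :: cs) =
              (if d - 1 = 0 then false else pvWrapsAux (d - 1) cs) by simp [pvWrapsAux]]
        rw [show pvStackRec lvl (")" :: cs) = (lvl - 1) :: pvStackRec (lvl - 1) cs by
              simp [pvStackRec]]
        rw [List.mem_cons]
        by_cases h3 : d - 1 = 0
        · rw [if_pos h3]
          constructor
          · intro _; left; omega
          · intro _; rfl
        · rw [if_neg h3, ih (d - 1) (lvl - 1) (by omega)]
          constructor
          · intro h; right; rw [show lvl - 1 - (d - 1) = lvl - d by ring] at h; exact h
          · rintro (h | h)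
            · omega
            · rw [show lvl - 1 - (d - 1) = lvl - d by ring]; exact h
      · rw [show pvWrapsAux d (c :: cs) = pvWrapsAux d cs by simp [pvWrapsAux, h1, h2]]
        rw [show pvStackRec lvl (c :: cs) = pvStackRec lvl cs by simp [pvStackRec, h1, h2]]
        exact ih d lvl hd

theorem pv_slice_one_neg_one {α : Type} (x y : α) (l : List α) :
    PySem.List.slice (x :: l ++ [y]) (some 1) (some (-1)) = l := by
  simp [PySem.List.slice]

-- main loop correspondence: A's loop, with its stack at level s, equals B's loop
theorem pvLoop_eq (n : Nat) : ∀ (lit : List String) (s : Int), lit.length ≤ n →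
    pvALoop lit (pvStackRec s lit) = unwrap_parentheses_py_alt lit := by
  induction n with
  | zero =>
    intro lit s hn
    have hnil : lit = [] := List.eq_nil_of_length_eq_zero (by omega)
    subst hnil
    rw [unwrap_parentheses_py_alt.eq_def]
    unfold pvALoop
    simp
  | succ n ih =>
    intro lit s hn
    match lit with
    | [] =>
      rw [unwrap_parentheses_py_alt.eq_def]
      unfold pvALoop
      simp
    | c :: rest =>
      rw [unwrap_parentheses_py_alt.eq_def]
      unfold pvALoop
      by_cases h1 : c = "("
      · subst h1
        rcases List.eq_nil_or_concat rest with hrest | ⟨mid, y, hrest⟩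
        · subst hrest
          have hlast : PySem.List.pyGet? ["("] (-1) = some "(" := by decide
          rw [if_pos (show PySem.List.pyGet? ["("] (-1) ≠ some ")" by simp [hlast]),
              dif_neg (by rintro ⟨h3, -⟩; simp at h3)]
          simp
        · rw [List.concat_eq_append] at hrest
          subst hrest
          have hlast : PySem.List.pyGet? ("(" :: (mid ++ [y])) (-1) = some y := by
            rw [show ("(" :: (mid ++ [y])) = ("(" :: mid) ++ [y] by simp,
                PySem.List.pyGet?_neg_one_append_singleton]
          by_cases h2 : y = ")"
          · subst h2
            rw [if_neg (show ¬ PySem.List.pyGet? ("(" :: (mid ++ [")"])) (-1) ≠ some ")" by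
              simp [hlast])]
            -- structure of the stack on '(' :: mid ++ [')']
            obtain ⟨e, he⟩ := pvStackRec_concat_close mid (s + 1)
            have hstack : pvStackRec s ("(" :: (mid ++ [")"])) =
                s :: pvStackRec (s + 1) mid ++ [e] := by
              simp [pvStackRec, he]
            have hslice_stack : PySem.List.slice
                (s :: pvStackRec (s + 1) mid ++ [e]) (some 1) (some (-1)) =
                pvStackRec (s + 1) mid := pv_slice_one_neg_one _ _ _
            have hslice_lit : PySem.List.slice ("(" :: (mid ++ [")"])) (some 1) (some (-1)) = mid := by
              rw [show ("(" :: (mid ++ [")"])) = "(" :: mid ++ [")"] by simp]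
              exact pv_slice_one_neg_one _ _ _
            have hhead : PySem.List.pyGetD (s :: pvStackRec (s + 1) mid ++ [e]) 0 0 = s :=
              PySem.List.pyGetD_zero_cons _ _ _
            rw [hstack, hhead, hslice_stack, hslice_lit]
            -- the two break conditions coincide
            have hcond : (s ∈ pvStackRec (s + 1) mid) ↔ pvWraps ("(" :: (mid ++ [")"])) = false := by
              rw [pvWraps, hslice_lit, pvWrapsAux_iff mid 1 (s + 1) (by omega),
                  show s + 1 - 1 = s by ring]
            by_cases hc : s ∈ pvStackRec (s + 1) mid
            · have hw : pvWraps ("(" :: (mid ++ [")"])) = false := hcond.mp hc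
              rw [if_pos hc, dif_neg (by rw [hw]; rintro ⟨-, -, -, h4⟩; simp at h4)]
              simp
            · have hw : pvWraps ("(" :: (mid ++ [")"])) = true := by
                rcases Bool.eq_false_or_eq_true (pvWraps ("(" :: (mid ++ [")"]))) with ht | hf
                · exact ht
                · exact absurd (hcond.mpr hf) hc
              rw [if_neg hc,
                  dif_pos ⟨by simp, by simp [PySem.List.pyGet?_zero_cons], hlast, hw⟩]
              simp only [if_true]
              have hmlen : mid.length ≤ n := by simp at hn; omega
              exact ih mid (s + 1) hmlen
          · -- last element is not ')': both loops stop
            rw [if_pos (show PySem.List.pyGet? ("(" :: (mid ++ [y])) (-1) ≠ some ")" by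
                  simp [hlast, h2]),
                dif_neg (by rintro ⟨-, -, h3, -⟩; rw [hlast] at h3; simp at h3; exact h2 h3)]
            simp
      · -- first element is not '(': both loops stop
        rw [if_neg h1, dif_neg (by rintro ⟨-, h2, -⟩; simp at h2; exact h1 h2)]

-- in the raise region B strips a pure balanced nest down to []
-- ===== VERDICT (by name: the statement is the Claim_ definition above) =====
theorem unwrap_parentheses_py_spec : Claim_equal_unwrap_parentheses_py := by
  unfold Claim_equal_unwrap_parentheses_py
  intro literal _ _
  unfold Spec_unwrap_parentheses_py unwrap_parentheses_py
  rw [pvStack_foldl_fst literal [] 0, List.nil_append]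
  exact pvLoop_eq literal.length literal 0 (le_refl _)
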